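-- pv_equiv track=rewrite | github.com/gautamsw5/Monthly-leetcoding-challenges | 2021/2021 October leetcoding challenge/16th October.py | solve
-- ===== SOURCE A (Python) =====
-- def solve(arr, i, K, dp):
--     ans = 0
--     for k in range(1, K+1):
--         jm = None
--         for i in range(len(arr)-1, -1, -1):
--             if jm == None:
--                 jm = i
--             elif arr[i][1] + dp[i+1][k-1] > arr[jm][1] + dp[jm+1][k-1]:
--                 jm = i
--             dp[i][k] = max(dp[i+1][k], arr[jm][1]-arr[i][0]+dp[jm+1][k-1])
--             # for j in range(i, len(arr)):
--             #     dp[i][k] = max(dp[i][k], arr[j][1]-arr[i][0]+dp[j+1][k-1])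
--             ans = max(ans, dp[i][k])
--     return ans
-- ===== SOURCE B (Python) =====
-- def solve(arr, i, K, dp):
--     # Same return value and same in-place dp mutation as A, computed by the
--     # direct inner scan over j instead of A's running-argmax (jm) tracking.
--     ans = 0
--     n = len(arr)
--     for k in range(1, K + 1):
--         for i in range(n - 1, -1, -1):
--             best = dp[i + 1][k]
--             for j in range(i, n):
--                 cand = arr[j][1] - arr[i][0] + dp[j + 1][k - 1]
--                 if cand > best:
--                     best = cand
--             dp[i][k] = best
--             if best > ans:
--                 ans = best
--     return ans
-- ===== Notes on version B (the rewrite author's own statement) =====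
-- stated objective: simpler
-- what changed: Replaced A's running-argmax bookkeeping (the jm pointer with its comparison of arr[i][1]+dp[i+1][k-1] against the tracked best) by the plain inner scan over j that computes the DP recurrence max directly; dp values, the in-place mutation of dp and ans are identical.
import Mathlib
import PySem

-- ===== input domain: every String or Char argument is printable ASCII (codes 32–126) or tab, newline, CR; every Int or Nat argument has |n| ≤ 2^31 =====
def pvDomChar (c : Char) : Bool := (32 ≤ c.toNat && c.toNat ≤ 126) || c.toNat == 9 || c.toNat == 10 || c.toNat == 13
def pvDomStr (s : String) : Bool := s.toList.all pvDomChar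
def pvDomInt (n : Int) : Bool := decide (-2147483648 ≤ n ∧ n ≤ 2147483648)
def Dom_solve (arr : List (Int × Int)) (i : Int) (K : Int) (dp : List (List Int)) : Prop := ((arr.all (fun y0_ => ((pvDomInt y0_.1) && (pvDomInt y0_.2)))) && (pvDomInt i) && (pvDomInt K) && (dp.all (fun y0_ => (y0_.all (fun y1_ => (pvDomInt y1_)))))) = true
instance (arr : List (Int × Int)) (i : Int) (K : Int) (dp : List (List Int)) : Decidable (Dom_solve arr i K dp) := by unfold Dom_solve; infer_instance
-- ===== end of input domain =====

-- B replaces A's running-argmax (jm) tracking by the direct inner scan over j (simpler, same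
-- dp values); A and B mutate dp identically in Python, the equivalence proved here is about
-- the RETURN value (the Lean ports thread dp functionally).

-- ===== PORT A =====
-- one iteration of A's inner 'for i in range(len(arr)-1,-1,-1)' loop; state = (ans, jm, dp)
def stepA (arr : List (Int × Int)) (k : Nat) (s : Int × Option Nat × List (List Int)) (i : Nat) :
    Int × Option Nat × List (List Int) :=
  let ans := s.1
  let jm? := s.2.1
  let dp := s.2.2
  let jm : Nat :=
    match jm? with
    | none => i
    | some jm =>
        if (arr.getD i (0, 0)).2 + (dp.getD (i + 1) []).getD (k - 1) 0 >
           (arr.getD jm (0, 0)).2 + (dp.getD (jm + 1) []).getD (k - 1) 0 then i else jm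
  let v : Int := max ((dp.getD (i + 1) []).getD k 0)
      ((arr.getD jm (0, 0)).2 - (arr.getD i (0, 0)).1 + (dp.getD (jm + 1) []).getD (k - 1) 0)
  (max ans v, some jm, dp.set i ((dp.getD i []).set k v))

def solve (arr : List (Int × Int)) (i : Int) (K : Int) (dp : List (List Int)) : Int :=
  (((List.range K.toNat).map (fun t => t + 1)).foldl
    (fun (st : Int × List (List Int)) (k : Nat) =>
      let r := (List.range arr.length).reverse.foldl (stepA arr k) (st.1, none, st.2)
      (r.1, r.2.2))
    (0, dp)).1

-- ===== PORT B =====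
-- one iteration of B's 'for i in range(n-1,-1,-1)' loop; state = (ans, dp)
def stepB (arr : List (Int × Int)) (k : Nat) (s : Int × List (List Int)) (i : Nat) :
    Int × List (List Int) :=
  let ans := s.1
  let dp := s.2
  let best : Int := (List.range' i (arr.length - i)).foldl
    (fun b j =>
      let cand := (arr.getD j (0, 0)).2 - (arr.getD i (0, 0)).1 + (dp.getD (j + 1) []).getD (k - 1) 0
      if cand > b then cand else b)
    ((dp.getD (i + 1) []).getD k 0)
  (if best > ans then best else ans, dp.set i ((dp.getD i []).set k best))

def solve_alt (arr : List (Int × Int)) (i : Int) (K : Int) (dp : List (List Int)) : Int :=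
  (((List.range K.toNat).map (fun t => t + 1)).foldl
    (fun (st : Int × List (List Int)) (k : Nat) =>
      (List.range arr.length).reverse.foldl (stepB arr k) st)
    (0, dp)).1

-- ===== PRECONDITION & SPEC =====
-- Pre_ excludes exactly the inputs where Python A raises an IndexError: when at least one
-- (k,i) loop iteration runs it indexes dp[0..len(arr)] at columns up to K.
def Pre_solve (arr : List (Int × Int)) (i : Int) (K : Int) (dp : List (List Int)) : Prop :=
  K ≤ 0 ∨ arr = [] ∨
    (arr.length + 1 ≤ dp.length ∧
      ∀ row ∈ dp.take (arr.length + 1), K + 1 ≤ (row.length : Int))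
instance (arr : List (Int × Int)) (i : Int) (K : Int) (dp : List (List Int)) :
    Decidable (Pre_solve arr i K dp) := by unfold Pre_solve; infer_instance

def pvWitness_solve : (List (Int × Int)) × Int × Int × List (List Int) :=
  ([(0, 3), (2, 5)], 0, 1, [[0, 0], [0, 0], [0, 0]])

def Spec_solve (arr : List (Int × Int)) (i : Int) (K : Int) (dp : List (List Int)) (out : Int) : Prop := out = solve_alt arr i K dp
instance (arr : List (Int × Int)) (i : Int) (K : Int) (dp : List (List Int)) (out : Int) : Decidable (Spec_solve arr i K dp out) := by unfold Spec_solve; infer_instance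

-- ===== CLAIM (what is proved, stated in full; the proofs are below) =====
def Claim_equal_solve : Prop := ∀ (arr : List (Int × Int)) (i : Int) (K : Int) (dp : List (List Int)), Dom_solve arr i K dp → Pre_solve arr i K dp → Spec_solve arr i K dp (solve arr i K dp)

-- ===== LEMMAS AND PROOFS =====

-- f arr dp k j = arr[j][1] + dp[j+1][k-1], the quantity A's jm pointer maximises
def fval (arr : List (Int × Int)) (dp : List (List Int)) (k j : Nat) : Int :=
  (arr.getD j (0, 0)).2 + (dp.getD (j + 1) []).getD (k - 1) 0

-- characterisation of B's inner max-scan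
lemma scan_spec (h : Nat → Int) :
    ∀ (L : List Nat) (a : Int),
      a ≤ L.foldl (fun b j => if h j > b then h j else b) a ∧
      (∀ j ∈ L, h j ≤ L.foldl (fun b j => if h j > b then h j else b) a) ∧
      (L.foldl (fun b j => if h j > b then h j else b) a = a ∨
        ∃ j ∈ L, L.foldl (fun b j => if h j > b then h j else b) a = h j) := by
  intro L
  induction L with
  | nil => intro a; simp
  | cons j L ih =>
      intro a
      simp only [List.foldl_cons]
      obtain ⟨h1, h2, h3⟩ := ih (if h j > a then h j else a)
      refine ⟨le_trans (by split_ifs <;> omega) h1, ?_, ?_⟩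
      · intro j' hj'
        rcases List.mem_cons.mp hj' with rfl | hj'
        · exact le_trans (by split_ifs <;> omega) h1
        · exact h2 j' hj'
      · rcases h3 with h3 | ⟨j', hj', h3⟩
        · by_cases hc : h j > a
          · exact Or.inr ⟨j, List.mem_cons_self, by simpa [hc] using h3⟩
          · exact Or.inl (by simpa [hc] using h3)
        · exact Or.inr ⟨j', List.mem_cons.mpr (Or.inr hj'), h3⟩

-- writing into column k leaves fval (which reads column k-1) unchanged, for 1 ≤ k
lemma fval_set (arr : List (Int × Int)) (dp : List (List Int)) (k : Nat) (hk : 1 ≤ k)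
    (i : Nat) (v : Int) (j : Nat) :
    fval arr (dp.set i ((dp.getD i []).set k v)) k j = fval arr dp k j := by
  unfold fval
  congr 1
  simp only [List.getD_eq_getElem?_getD, List.getElem?_set]
  split_ifs with h1 h2
  · subst h1
    simp only [List.getElem?_eq_getElem h2, Option.getD_some]
    rw [List.getElem?_set, if_neg (show ¬(k = k - 1) by omega)]
  · subst h1
    rw [List.getElem?_eq_none (show dp.length ≤ j + 1 by omega)]
  · rfl

-- core: A's inner fold and B's inner fold agree (ans and dp) given A's jm invariant
lemma inner_eq (arr : List (Int × Int)) (k : Nat) (hk : 1 ≤ k) :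
    ∀ (m : Nat), m ≤ arr.length →
    ∀ (ans : Int) (dp : List (List Int)) (jm? : Option Nat),
      (match jm? with
       | none => m = arr.length
       | some jm => m ≤ jm ∧ jm < arr.length ∧
           ∀ j, m ≤ j → j < arr.length → fval arr dp k j ≤ fval arr dp k jm) →
      ((List.range m).reverse.foldl (stepA arr k) (ans, jm?, dp)).1 =
        ((List.range m).reverse.foldl (stepB arr k) (ans, dp)).1 ∧
      ((List.range m).reverse.foldl (stepA arr k) (ans, jm?, dp)).2.2 =
        ((List.range m).reverse.foldl (stepB arr k) (ans, dp)).2 := by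
  intro m
  induction m with
  | zero => intro _ ans dp jm? _; simp
  | succ m ih =>
      intro hm ans dp jm? hinv
      rw [List.range_succ, List.reverse_append, List.reverse_singleton]
      simp only [List.singleton_append, List.foldl_cons]
      set c : Int := (arr.getD m (0, 0)).1 with hc
      set base : Int := (dp.getD (m + 1) []).getD k 0 with hbase
      set h : Nat → Int :=
        fun j => (arr.getD j (0, 0)).2 - c + (dp.getD (j + 1) []).getD (k - 1) 0 with hh
      have hhf : ∀ j, h j = fval arr dp k j - c := by
        intro j; simp only [hh, fval, hc]; ring
      -- one A-step: the new jm attains the max of fval over [m, arr.length)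
      obtain ⟨jm', hr1, hr2, hmax, hstepA⟩ :
          ∃ jm', m ≤ jm' ∧ jm' < arr.length ∧
            (∀ j, m ≤ j → j < arr.length → fval arr dp k j ≤ fval arr dp k jm') ∧
            stepA arr k (ans, jm?, dp) m =
              (max ans (max base (h jm')), some jm',
                dp.set m ((dp.getD m []).set k (max base (h jm')))) := by
        cases jm? with
        | none =>
            have hmn : m + 1 = arr.length := by simpa using hinv
            refine ⟨m, le_rfl, by omega, ?_, ?_⟩
            · intro j hj1 hj2
              have hje : j = m := by omega
              subst hje; exact le_rfl
            · simp only [stepA, hh, hbase, hc]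
        | some jm =>
            obtain ⟨h1, h2, h3⟩ := hinv
            by_cases hcmp : (arr.getD m (0, 0)).2 + (dp.getD (m + 1) []).getD (k - 1) 0 >
                (arr.getD jm (0, 0)).2 + (dp.getD (jm + 1) []).getD (k - 1) 0
            · refine ⟨m, le_rfl, by omega, ?_, ?_⟩
              · intro j hj1 hj2
                rcases eq_or_lt_of_le hj1 with rfl | hj1'
                · exact le_rfl
                · have hfj := h3 j (by omega) hj2
                  have hfm : fval arr dp k jm < fval arr dp k m := by
                    simpa [fval] using hcmp
                  linarith
              · simp only [stepA, hh, hbase, hc, if_pos hcmp]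
            · refine ⟨jm, by omega, h2, ?_, ?_⟩
              · intro j hj1 hj2
                rcases eq_or_lt_of_le hj1 with rfl | hj1'
                · simpa [fval] using le_of_not_gt hcmp
                · exact h3 j (by omega) hj2
              · simp only [stepA, hh, hbase, hc, if_neg hcmp]
      set L : List Nat := List.range' m (arr.length - m) with hL
      have hmemL : ∀ j, j ∈ L ↔ m ≤ j ∧ j < arr.length := by
        intro j; rw [hL, List.mem_range']
        constructor
        · rintro ⟨t, ht, rfl⟩; omega
        · intro ⟨hj1, hj2⟩; exact ⟨j - m, by omega, by omega⟩
      obtain ⟨s1, s2, s3⟩ := scan_spec h L base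
      set best : Int := L.foldl (fun b j => if h j > b then h j else b) base with hbest
      -- A's written value equals B's scan value
      have hveq : max base (h jm') = best := by
        apply le_antisymm
        · exact max_le s1 (s2 jm' ((hmemL jm').mpr ⟨hr1, hr2⟩))
        · rcases s3 with h3 | ⟨j, hj, h3⟩
          · rw [h3]; exact le_max_left _ _
          · rw [h3]
            have hj' := (hmemL j).mp hj
            have hle : fval arr dp k j ≤ fval arr dp k jm' := hmax j hj'.1 hj'.2
            have hle' : h j ≤ h jm' := by rw [hhf, hhf]; linarith
            exact le_trans hle' (le_max_right _ _)
      have hstepB : stepB arr k (ans, dp) m =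
          (if best > ans then best else ans, dp.set m ((dp.getD m []).set k best)) := by
        simp only [stepB, hbest, hL, hh, hbase, hc]
      rw [hstepA, hstepB]
      have hif : max ans (max base (h jm')) = if best > ans then best else ans := by
        rw [hveq]; split_ifs <;> omega
      rw [hif, hveq]
      exact ih (by omega) _ _ (some jm')
        ⟨hr1, hr2, by
          intro j hj1 hj2
          simp only [fval_set arr dp k hk]
          exact hmax j (by omega) hj2⟩

-- the outer k-loop: both states (ans, dp) stay equal
lemma outer_eq (arr : List (Int × Int)) :
    ∀ (ks : List Nat), (∀ k ∈ ks, 1 ≤ k) →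
    ∀ (st : Int × List (List Int)),
      (ks.foldl (fun (st : Int × List (List Int)) (k : Nat) =>
          let r := (List.range arr.length).reverse.foldl (stepA arr k) (st.1, none, st.2)
          (r.1, r.2.2)) st) =
      (ks.foldl (fun (st : Int × List (List Int)) (k : Nat) =>
          (List.range arr.length).reverse.foldl (stepB arr k) st) st) := by
  intro ks
  induction ks with
  | nil => intro _ st; rfl
  | cons k ks ih =>
      intro hks st
      simp only [List.foldl_cons]
      obtain ⟨h1, h2⟩ := inner_eq arr k (hks k List.mem_cons_self) arr.length le_rfl st.1 st.2 none rfl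
      have hbody : (let r := (List.range arr.length).reverse.foldl (stepA arr k) (st.1, none, st.2);
            ((r.1, r.2.2) : Int × List (List Int))) =
          (List.range arr.length).reverse.foldl (stepB arr k) st := by
        have hst : (List.range arr.length).reverse.foldl (stepB arr k) (st.1, st.2) =
            (List.range arr.length).reverse.foldl (stepB arr k) st := by rfl
        rw [← hst]
        exact Prod.ext h1 h2
      rw [hbody]
      exact ih (fun k' hk' => hks k' (List.mem_cons.mpr (Or.inr hk'))) _

-- ===== VERDICT (by name: the statement is the Claim_ definition above) =====
theorem solve_spec : Claim_equal_solve := by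
  intro arr i K dp _ _
  unfold Spec_solve solve solve_alt
  rw [outer_eq arr _ (by intro k hk; simp at hk; omega)]
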